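-- pv_equiv track=rewrite | github.com/karanysingh/audio-stenography-flask | helper.py | zw_encode
-- ===== SOURCE A (Python) =====
-- zwc_4 = ["\u200C", "\u200D", "\u200E", "\u200F"]
--
-- def zw_encode(msg, binary=False, character_set=None):
--     '''
--     Encode a message using specified set of zero width characters.
--     '''
--     code = ''
--     if not character_set:
--         character_set = zwc_4
--     if binary:
--         msg_bytes = msg
--     else:
--         msg_bytes = bytes(msg, 'utf-8')
--     for by in msg_bytes:
--         bit_mask = 0b00000011
--
--         for i in range(4):
--             m_byte = by & bit_mask
--             by = by >> 2
--
--             if m_byte == 3: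
--                 code += character_set[3]
--             elif m_byte == 2:
--                 code += character_set[2]
--             elif m_byte == 1:
--                 code += character_set[1]
--             elif m_byte == 0:
--                 code += character_set[0]
--
--     return code
-- ===== SOURCE B (Python) =====
-- zwc_4 = ["\u200C", "\u200D", "\u200E", "\u200F"]
--
-- def zw_encode(msg, binary=False, character_set=None):
--     '''
--     Encode a message using specified set of zero width characters.
--     '''
--     if not character_set:
--         character_set = zwc_4
--     table = [character_set[v & 3] + character_set[(v >> 2) & 3]
--              + character_set[(v >> 4) & 3] + character_set[(v >> 6) & 3]
--              for v in range(256)]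
--     msg_bytes = msg if binary else bytes(msg, 'utf-8')
--     return ''.join(table[by] for by in msg_bytes)
-- ===== Notes on version B (the rewrite author's own statement) =====
-- stated objective: faster
-- what changed: Replaced the per-byte inner 4-iteration bit loop and if/elif chain by a 256-entry lookup table built once from the resolved character_set, so the body is a single join over one table lookup per byte.
-- outside the precondition, e.g. on zw_encode('', False, ['a']): A returns '', B raises IndexError; on zw_encode('A', False, ['x', 'y']): A returns 'yxxy', B raises IndexError
import Mathlib
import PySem

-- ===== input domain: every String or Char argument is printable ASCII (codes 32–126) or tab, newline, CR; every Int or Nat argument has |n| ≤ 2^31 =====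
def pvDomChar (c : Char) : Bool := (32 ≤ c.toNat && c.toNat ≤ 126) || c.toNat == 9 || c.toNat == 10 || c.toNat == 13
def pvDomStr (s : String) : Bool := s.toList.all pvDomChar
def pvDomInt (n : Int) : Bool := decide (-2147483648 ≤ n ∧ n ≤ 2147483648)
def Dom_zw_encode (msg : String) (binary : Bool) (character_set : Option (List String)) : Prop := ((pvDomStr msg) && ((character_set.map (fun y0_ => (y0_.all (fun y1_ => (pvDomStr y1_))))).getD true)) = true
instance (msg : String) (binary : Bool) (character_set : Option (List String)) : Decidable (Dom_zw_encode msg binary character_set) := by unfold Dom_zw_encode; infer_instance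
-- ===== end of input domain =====

-- B replaces A's per-byte 4-iteration bit loop and if/elif chain by a 256-entry lookup table
-- built once from the resolved character set, then one table lookup per byte (objective: faster).


def zwc4 : List String := ["\u200C", "\u200D", "\u200E", "\u200F"]

-- ===== PORT A =====
-- inner 'for i in range(4)' body: m_byte = by & 3; by = by >> 2; if/elif chain appending
def zwStep (cs : List String) (st : String × Nat) : String × Nat :=
  let m := st.2 % 4          -- by & 0b00000011
  let b' := st.2 / 4         -- by >> 2
  if m = 3 then (st.1 ++ cs.getD 3 "", b')
  else if m = 2 then (st.1 ++ cs.getD 2 "", b')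
  else if m = 1 then (st.1 ++ cs.getD 1 "", b')
  else if m = 0 then (st.1 ++ cs.getD 0 "", b')
  else (st.1, b')

-- Note: in Python the binary=True branch keeps the str itself, on which 'by & 3' raises
-- TypeError for every character; Pre_ admits binary=true only with msg = "", where both
-- branches give the empty byte sequence. On the ASCII Dom, utf-8 bytes = the char codes.
def zw_encode (msg : String) (binary : Bool) (character_set : Option (List String)) : String :=
  let cs := match character_set with
            | none => zwc4
            | some l => if l = [] then zwc4 else l
  let msg_bytes : List Nat := if binary then msg.toList.map Char.toNat
                              else msg.toList.map Char.toNat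
  msg_bytes.foldl
    (fun code by0 => ((List.range 4).foldl (fun st _ => zwStep cs st) (code, by0)).1) ""

-- ===== PORT B =====
-- table entry for byte value v: cs[v&3] + cs[(v>>2)&3] + cs[(v>>4)&3] + cs[(v>>6)&3]
def zwTableEntry (cs : List String) (v : Nat) : String :=
  cs.getD (v % 4) "" ++ cs.getD (v / 4 % 4) "" ++ cs.getD (v / 16 % 4) "" ++ cs.getD (v / 64 % 4) ""

def zw_encode_alt (msg : String) (binary : Bool) (character_set : Option (List String)) : String :=
  let cs := match character_set with
            | none => zwc4
            | some l => if l = [] then zwc4 else l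
  let table := (List.range 256).map (zwTableEntry cs)
  let msg_bytes : List Nat := if binary then msg.toList.map Char.toNat
                              else msg.toList.map Char.toNat
  String.join (msg_bytes.map (fun b => table.getD b ""))

-- ===== PRECONDITION & SPEC =====
-- Pre_ excludes (1) binary=True with a nonempty msg, where both Pythons raise TypeError, and
-- (2) a nonempty character_set shorter than 4, where B's eager table raises IndexError while A
-- can still return when every 2-bit chunk of the message stays below the list length.
def Pre_zw_encode (msg : String) (binary : Bool) (character_set : Option (List String)) : Prop :=
  (binary = false ∨ msg = "") ∧
  (character_set = none ∨ character_set = some [] ∨ 4 ≤ (character_set.getD []).length)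
instance (msg : String) (binary : Bool) (character_set : Option (List String)) : Decidable (Pre_zw_encode msg binary character_set) := by unfold Pre_zw_encode; infer_instance

def pvWitness_zw_encode : String × Bool × Option (List String) := ("hi", false, some ["a", "b", "c", "d"])

def Spec_zw_encode (msg : String) (binary : Bool) (character_set : Option (List String)) (out : String) : Prop := out = zw_encode_alt msg binary character_set
instance (msg : String) (binary : Bool) (character_set : Option (List String)) (out : String) : Decidable (Spec_zw_encode msg binary character_set out) := by unfold Spec_zw_encode; infer_instance

-- ===== CLAIM (what is proved, stated in full; the proofs are below) =====
def Claim_equal_zw_encode : Prop := ∀ (msg : String) (binary : Bool) (character_set : Option (List String)), Dom_zw_encode msg binary character_set → Pre_zw_encode msg binary character_set → Spec_zw_encode msg binary character_set (zw_encode msg binary character_set)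

-- ===== LEMMAS AND PROOFS =====

theorem zwStep_eq (cs : List String) (st : String × Nat) :
    zwStep cs st = (st.1 ++ cs.getD (st.2 % 4) "", st.2 / 4) := by
  have h : st.2 % 4 = 0 ∨ st.2 % 4 = 1 ∨ st.2 % 4 = 2 ∨ st.2 % 4 = 3 := by omega
  rcases h with h | h | h | h <;> simp [zwStep, h]

theorem zw_inner_eq (cs : List String) (code : String) (b : Nat) :
    ((List.range 4).foldl (fun st _ => zwStep cs st) (code, b)).1
      = code ++ zwTableEntry cs b := by
  have h4 : List.range 4 = [0, 1, 2, 3] := rfl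
  simp [h4, List.foldl, zwStep_eq, zwTableEntry, Nat.div_div_eq_div_mul, String.append_assoc]

theorem table_getD (cs : List String) (b : Nat) (hb : b < 256) :
    ((List.range 256).map (zwTableEntry cs)).getD b "" = zwTableEntry cs b := by
  simp [List.getD, hb]

theorem foldl_append_shift (l : List String) (a : String) :
    List.foldl (fun r s => r ++ s) a l = a ++ List.foldl (fun r s => r ++ s) "" l := by
  induction l generalizing a with
  | nil => simp
  | cons s t ih =>
      simp only [List.foldl_cons]
      rw [ih (a ++ s), ih ("" ++ s)]
      simp [String.append_assoc]

theorem fold_join (cs : List String) (l : List Nat) (code : String)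
    (hl : ∀ b ∈ l, b < 256) :
    l.foldl (fun code by0 => ((List.range 4).foldl (fun st _ => zwStep cs st) (code, by0)).1) code
      = code ++ String.join (l.map fun b => ((List.range 256).map (zwTableEntry cs)).getD b "") := by
  induction l generalizing code with
  | nil => simp [String.join]
  | cons b t ih =>
      have hb : b < 256 := hl b (by simp)
      have ht : ∀ x ∈ t, x < 256 := fun x hx => hl x (by simp [hx])
      simp only [List.foldl_cons, List.map_cons, String.join]
      rw [zw_inner_eq, ih _ ht, table_getD cs b hb]
      rw [foldl_append_shift]
      simp [String.join, String.append_assoc]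

-- ===== VERDICT (by name: the statement is the Claim_ definition above) =====
theorem zw_encode_spec : Claim_equal_zw_encode := by
  intro msg binary character_set hdom _hpre
  unfold Spec_zw_encode zw_encode zw_encode_alt
  have hdomstr : pvDomStr msg = true := by
    unfold Dom_zw_encode at hdom
    exact (Bool.and_eq_true_iff.mp hdom).1
  have hb : ∀ b ∈ (if binary then msg.toList.map Char.toNat else msg.toList.map Char.toNat),
      b < 256 := by
    intro b hbmem
    rw [ite_self] at hbmem
    obtain ⟨c, hc, rfl⟩ := List.mem_map.mp hbmem
    have := List.all_eq_true.mp (by simpa [pvDomStr] using hdomstr) c hc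
    simp [pvDomChar] at this
    omega
  rw [ite_self] at hb
  simp only [ite_self]
  exact fold_join _ _ "" hb
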